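-- pv_equiv track=rewrite | github.com/akshay-greenlang/Code-V1_GreenLang | GreenLang Development/01-Core-Platform/schema/suggestions/patches.py | parse_json_pointer
-- ===== SOURCE A (Python) =====
-- from typing import Any, Dict, List, Optional, Tuple, Union
--
-- class JSONPointerError(ValueError):
--     """Error raised for invalid JSON Pointer operations."""
--     pass
--
-- def unescape_json_pointer_token(token: str) -> str:
--     """
--     Unescape a JSON Pointer token per RFC 6901.
--
--     The order of unescaping is important: ~1 must be unescaped first,
--     then ~0.
--
--     Args:
--         token: The escaped token.
--
--     Returns:
--         The unescaped token.
--
--     Example: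
--         >>> unescape_json_pointer_token("a~1b~0c")
--         'a/b~c'
--     """
--     # Order matters: unescape ~1 first, then ~0
--     return token.replace("~1", "/").replace("~0", "~")
--
-- def parse_json_pointer(pointer: str) -> List[str]:
--     """
--     Parse a JSON Pointer string into path segments.
--
--     Parses a JSON Pointer (RFC 6901) string into a list of unescaped
--     path segments. The empty string represents the root document.
--
--     Args:
--         pointer: A valid JSON Pointer string.
--
--     Returns:
--         List of unescaped path segments.
--
--     Raises:
--         JSONPointerError: If the pointer is not a valid JSON Pointer.
--
--     Example:
--         >>> parse_json_pointer("")
--         []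
--         >>> parse_json_pointer("/foo/bar")
--         ['foo', 'bar']
--         >>> parse_json_pointer("/a~1b/c~0d")
--         ['a/b', 'c~d']
--         >>> parse_json_pointer("/0/1")
--         ['0', '1']
--     """
--     # Empty string is the root document
--     if pointer == "":
--         return []
--
--     # Must start with /
--     if not pointer.startswith("/"):
--         raise JSONPointerError(
--             f"Invalid JSON Pointer '{pointer}': must start with '/' or be empty"
--         )
--
--     # Split and unescape each token
--     tokens = pointer[1:].split("/")
--     return [unescape_json_pointer_token(token) for token in tokens]
-- ===== SOURCE B (Python) =====
-- from typing import List
--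
-- class JSONPointerError(ValueError):
--     pass
--
-- def parse_json_pointer(pointer: str) -> List[str]:
--     """Single-pass scanner: split on '/' and unescape ~1/~0 in one traversal."""
--     if pointer == "":
--         return []
--     if not pointer.startswith("/"):
--         raise JSONPointerError(
--             f"Invalid JSON Pointer '{pointer}': must start with '/' or be empty"
--         )
--     s = pointer[1:]
--     result: List[str] = []
--     buf: List[str] = []
--     i = 0
--     n = len(s)
--     while i < n:
--         c = s[i]
--         if c == '/':
--             result.append(''.join(buf))
--             buf = []
--             i += 1
--         elif c == '~' and i + 1 < n and s[i + 1] == '1':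
--             buf.append('/')
--             i += 2
--         elif c == '~' and i + 1 < n and s[i + 1] == '0':
--             buf.append('~')
--             i += 2
--         else:
--             buf.append(c)
--             i += 1
--     result.append(''.join(buf))
--     return result
-- ===== Notes on version B (the rewrite author's own statement) =====
-- stated objective: alternative
-- what changed: Replaces splitting on the separator followed by two whole-token replace passes with a single character-by-character scan that splits segments and resolves the two escape sequences in one traversal.
import Mathlib
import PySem

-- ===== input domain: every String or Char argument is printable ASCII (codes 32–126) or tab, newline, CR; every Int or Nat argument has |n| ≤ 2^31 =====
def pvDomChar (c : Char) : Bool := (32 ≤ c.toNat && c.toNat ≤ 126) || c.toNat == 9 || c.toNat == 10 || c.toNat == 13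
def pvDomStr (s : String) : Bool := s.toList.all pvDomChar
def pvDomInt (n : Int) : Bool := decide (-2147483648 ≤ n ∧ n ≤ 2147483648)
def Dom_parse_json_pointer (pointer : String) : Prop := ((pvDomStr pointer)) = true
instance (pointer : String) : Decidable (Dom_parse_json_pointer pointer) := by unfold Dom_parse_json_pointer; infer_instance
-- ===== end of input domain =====

-- B replaces split-then-double-replace by a single character scan (alternative decomposition, same cost); on invalid pointers both raise the same error.

-- ===== PORT A =====
def unescape_json_pointer_token (token : String) : String :=
  PySem.Str.replace (PySem.Str.replace token "~1" "/") "~0" "~"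

def parse_json_pointer (pointer : String) : List String :=
  if pointer = "" then []
  else if PySem.Str.startswith pointer "/" = false then []  -- raise JSONPointerError: excluded by Pre_
  else
    match PySem.Str.split? (PySem.Str.slice pointer (some 1) none) "/" with
    | some tokens => tokens.map unescape_json_pointer_token
    | none => []  -- unreachable: separator "/" is nonempty

-- ===== PORT B =====
-- the scanner loop of Source B: buf is the current segment, res the finished ones
def pvAltGo : List Char → List Char → List (List Char) → List (List Char)
  | [], buf, res => res ++ [buf]
  | c :: rest, buf, res =>
    if c = '/' then pvAltGo rest [] (res ++ [buf])
    else if c = '~' then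
      match rest with
      | r1 :: r =>
        if r1 = '1' then pvAltGo r (buf ++ ['/']) res
        else if r1 = '0' then pvAltGo r (buf ++ ['~']) res
        else pvAltGo (r1 :: r) (buf ++ ['~']) res
      | [] => pvAltGo [] (buf ++ ['~']) res
    else pvAltGo rest (buf ++ [c]) res
termination_by l _ _ => l.length

def parse_json_pointer_alt (pointer : String) : List String :=
  if pointer = "" then []
  else if PySem.Str.startswith pointer "/" = false then []  -- raise JSONPointerError: excluded by Pre_
  else (pvAltGo (PySem.Str.slice pointer (some 1) none).toList [] []).map String.ofList

-- ===== PRECONDITION & SPEC =====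
-- Pre_ excludes exactly the pointers on which A raises JSONPointerError (nonempty strings not beginning with a slash); B raises there too.
def Pre_parse_json_pointer (pointer : String) : Prop :=
  pointer = "" ∨ PySem.Str.startswith pointer "/" = true
instance (pointer : String) : Decidable (Pre_parse_json_pointer pointer) := by
  unfold Pre_parse_json_pointer; infer_instance
def pvWitness_parse_json_pointer : String := "/a~1b/c~0d"

def Spec_parse_json_pointer (pointer : String) (out : List String) : Prop := out = parse_json_pointer_alt pointer
instance (pointer : String) (out : List String) : Decidable (Spec_parse_json_pointer pointer out) := by unfold Spec_parse_json_pointer; infer_instance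

-- ===== CLAIM (what is proved, stated in full; the proofs are below) =====
def Claim_equal_parse_json_pointer : Prop := ∀ (pointer : String), Dom_parse_json_pointer pointer → Pre_parse_json_pointer pointer → Spec_parse_json_pointer pointer (parse_json_pointer pointer)

-- ===== LEMMAS AND PROOFS =====

-- specification-side helpers (used only by the proofs)
def pvModHead (p : List Char) : List (List Char) → List (List Char)
  | [] => [p]
  | h :: t => (p ++ h) :: t

def pvSplit1 : List Char → List (List Char)
  | [] => [[]]
  | c :: t => if c = '/' then [] :: pvSplit1 t else pvModHead [c] (pvSplit1 t)

def pvRep (old new : List Char) : List Char → List Char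
  | [] => []
  | c :: t =>
    if old.isPrefixOf (c :: t) then new ++ pvRep old new (t.drop (old.length - 1))
    else c :: pvRep old new t
termination_by l => l.length
decreasing_by
  · simp only [List.length_cons, List.length_drop]; omega
  · simp only [List.length_cons]; omega

def pvUnesc (l : List Char) : List Char :=
  pvRep ['~', '0'] ['~'] (pvRep ['~', '1'] ['/'] l)

theorem pvModHead_modHead (p q : List Char) (xs : List (List Char)) :
    pvModHead p (pvModHead q xs) = pvModHead (p ++ q) xs := by
  cases xs <;> simp [pvModHead]

theorem pvModHead_nil (xs : List (List Char)) (h : xs ≠ []) : pvModHead [] xs = xs := by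
  cases xs with
  | nil => exact absurd rfl h
  | cons a t => simp [pvModHead]

theorem pvSplit1_ne_nil (l : List Char) : pvSplit1 l ≠ [] := by
  cases l with
  | nil => simp [pvSplit1]
  | cons c t =>
    simp only [pvSplit1]
    split
    · simp
    · cases h : pvSplit1 t <;> simp [pvModHead]

theorem rep_go_eq (old new : List Char) (hold : old ≠ []) :
    ∀ (fuel : Nat) (l acc : List Char), l.length ≤ fuel →
      PySem.Chars.replace.go old new fuel l acc = acc.reverse ++ pvRep old new l := by
  intro fuel
  induction fuel with
  | zero =>
    intro l acc hl
    have : l = [] := List.length_eq_zero_iff.mp (Nat.le_zero.mp hl)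
    subst this
    rw [PySem.Chars.replace.go.eq_def]
    simp [pvRep]
  | succ f ih =>
    intro l acc hl
    cases l with
    | nil => rw [PySem.Chars.replace.go.eq_def]; simp [pvRep]
    | cons c t =>
      rw [PySem.Chars.replace.go.eq_def]
      simp only []
      by_cases hp : old.isPrefixOf (c :: t) = true
      · rw [if_pos hp]
        obtain ⟨k, hk⟩ : ∃ k, old.length = k + 1 := by
          cases old with
          | nil => exact absurd rfl hold
          | cons a b => exact ⟨b.length, rfl⟩
        have hdrop : List.drop old.length (c :: t) = t.drop (old.length - 1) := by
          rw [hk]; simp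
        rw [hdrop]
        rw [ih _ _ (by simp at hl ⊢; omega)]
        rw [pvRep]
        rw [if_pos hp]
        simp
      · rw [if_neg hp]
        rw [ih _ _ (by simp at hl ⊢; omega)]
        rw [pvRep]
        rw [if_neg hp]
        simp

theorem replace_eq (l old new : List Char) (hold : old ≠ []) :
    PySem.Chars.replace l old new = pvRep old new l := by
  rw [PySem.Chars.replace]
  rw [if_neg (by simpa using hold)]
  simpa using rep_go_eq old new hold l.length l [] le_rfl

theorem split_go_eq :
    ∀ (fuel : Nat) (l cur : List Char) (acc : List (List Char)), l.length < fuel →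
      PySem.Chars.splitOn.go ['/'] fuel l cur acc
        = acc.reverse ++ pvModHead cur.reverse (pvSplit1 l) := by
  intro fuel
  induction fuel with
  | zero => intro l cur acc hl; omega
  | succ f ih =>
    intro l cur acc hl
    cases l with
    | nil =>
      rw [PySem.Chars.splitOn.go.eq_def]
      simp [pvSplit1, pvModHead]
    | cons c t =>
      rw [PySem.Chars.splitOn.go.eq_def]
      simp only []
      by_cases hp : List.isPrefixOf ['/'] (c :: t) = true
      · have hc : c = '/' := by
          simp [List.isPrefixOf] at hp; exact hp.symm
        rw [if_pos hp]
        have : List.drop (List.length ['/']) (c :: t) = t := by simp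
        rw [this]
        rw [ih _ _ _ (by simp at hl ⊢; omega)]
        rw [pvSplit1, if_pos hc]
        rw [List.reverse_nil, pvModHead_nil _ (pvSplit1_ne_nil t)]
        simp [pvModHead]
      · have hc : c ≠ '/' := by
          intro h; apply hp; simp [List.isPrefixOf, h]
        rw [if_neg hp]
        rw [ih _ _ _ (by simp at hl ⊢; omega)]
        rw [pvSplit1, if_neg hc]
        rw [pvModHead_modHead]
        simp

theorem splitOn_slash (l : List Char) :
    PySem.Chars.splitOn l ['/'] = pvSplit1 l := by
  rw [PySem.Chars.splitOn]
  rw [split_go_eq (l.length + 1) l [] [] (by omega)]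
  simpa using pvModHead_nil _ (pvSplit1_ne_nil l)

-- character-level behaviour of the double replace
theorem pvRep_nil (old new : List Char) : pvRep old new [] = [] := by rw [pvRep]

theorem pvRep_cons (old new : List Char) (c : Char) (t : List Char) :
    pvRep old new (c :: t)
      = if old.isPrefixOf (c :: t) then new ++ pvRep old new (t.drop (old.length - 1))
        else c :: pvRep old new t := by
  rw [pvRep]

theorem pvUnesc_nil : pvUnesc [] = [] := by simp [pvUnesc, pvRep_nil]

theorem pvUnesc_t1 (x : List Char) : pvUnesc ('~' :: '1' :: x) = '/' :: pvUnesc x := by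
  rw [pvUnesc, pvRep_cons, if_pos (by simp [List.isPrefixOf])]
  simp only [List.length_cons, List.length_nil]
  rw [pvUnesc]
  norm_num
  rw [pvRep_cons, if_neg (by simp [List.isPrefixOf])]

theorem pvUnesc_t0 (x : List Char) : pvUnesc ('~' :: '0' :: x) = '~' :: pvUnesc x := by
  have h1 : pvRep ['~', '1'] ['/'] ('~' :: '0' :: x) = '~' :: '0' :: pvRep ['~', '1'] ['/'] x := by
    rw [pvRep_cons, if_neg (by simp [List.isPrefixOf])]
    rw [pvRep_cons, if_neg (by simp [List.isPrefixOf])]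
  rw [pvUnesc, h1, pvRep_cons, if_pos (by simp [List.isPrefixOf])]
  simp [pvUnesc]

theorem pvRep_t1_head (x : List Char) (h0 : x.head? ≠ some '0') :
    (pvRep ['~', '1'] ['/'] x).head? ≠ some '0' := by
  cases x with
  | nil => simp [pvRep_nil]
  | cons c t =>
    rw [pvRep_cons]
    split
    · simp
    · simpa using h0

theorem pvUnesc_tilde (x : List Char) (h0 : x.head? ≠ some '0') (h1 : x.head? ≠ some '1') :
    pvUnesc ('~' :: x) = '~' :: pvUnesc x := by
  have hp1 : List.isPrefixOf ['~', '1'] ('~' :: x) ≠ true := by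
    cases x with
    | nil => simp [List.isPrefixOf]
    | cons c t =>
      simp only [List.head?_cons, ne_eq, Option.some.injEq] at h1
      simp [List.isPrefixOf, Ne.symm h1]
  rw [pvUnesc, pvRep_cons, if_neg hp1]
  have hp0 : List.isPrefixOf ['~', '0'] ('~' :: pvRep ['~', '1'] ['/'] x) ≠ true := by
    have := pvRep_t1_head x h0
    cases hr : pvRep ['~', '1'] ['/'] x with
    | nil => simp [List.isPrefixOf]
    | cons d r =>
      rw [hr] at this
      simp only [List.head?_cons, ne_eq, Option.some.injEq] at this
      simp [List.isPrefixOf, Ne.symm this]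
  rw [pvUnesc, pvRep_cons, if_neg hp0]

theorem pvUnesc_other (c : Char) (x : List Char) (hc : c ≠ '~') :
    pvUnesc (c :: x) = c :: pvUnesc x := by
  rw [pvUnesc, pvRep_cons, if_neg (by simp [List.isPrefixOf, Ne.symm hc])]
  rw [pvRep_cons, if_neg (by simp [List.isPrefixOf, Ne.symm hc])]
  rfl

-- segment-level key lemmas
theorem key_slash (r : List Char) :
    (pvSplit1 ('/' :: r)).map pvUnesc = [] :: (pvSplit1 r).map pvUnesc := by
  rw [pvSplit1, if_pos rfl]
  simp [pvUnesc_nil]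

theorem key_cons (c : Char) (r : List Char) (hc : c ≠ '/') (hct : c ≠ '~') :
    (pvSplit1 (c :: r)).map pvUnesc = pvModHead [c] ((pvSplit1 r).map pvUnesc) := by
  rw [pvSplit1, if_neg hc]
  obtain ⟨s, ss, hs⟩ := List.exists_cons_of_ne_nil (pvSplit1_ne_nil r)
  rw [hs]
  simp [pvModHead, pvUnesc_other c s hct]

theorem key_t1 (r : List Char) :
    (pvSplit1 ('~' :: '1' :: r)).map pvUnesc = pvModHead ['/'] ((pvSplit1 r).map pvUnesc) := by
  rw [pvSplit1, if_neg (by decide), pvSplit1, if_neg (by decide)]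
  obtain ⟨s, ss, hs⟩ := List.exists_cons_of_ne_nil (pvSplit1_ne_nil r)
  rw [hs]
  simp [pvModHead, pvUnesc_t1]

theorem key_t0 (r : List Char) :
    (pvSplit1 ('~' :: '0' :: r)).map pvUnesc = pvModHead ['~'] ((pvSplit1 r).map pvUnesc) := by
  rw [pvSplit1, if_neg (by decide), pvSplit1, if_neg (by decide)]
  obtain ⟨s, ss, hs⟩ := List.exists_cons_of_ne_nil (pvSplit1_ne_nil r)
  rw [hs]
  simp [pvModHead, pvUnesc_t0]

theorem key_tilde (m : List Char) (h0 : m.head? ≠ some '0') (h1 : m.head? ≠ some '1') :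
    (pvSplit1 ('~' :: m)).map pvUnesc = pvModHead ['~'] ((pvSplit1 m).map pvUnesc) := by
  rw [pvSplit1, if_neg (by decide)]
  cases m with
  | nil => simp [pvSplit1, pvModHead, pvUnesc_nil, pvUnesc_tilde [] (by simp) (by simp)]
  | cons c t =>
    simp only [List.head?_cons, ne_eq, Option.some.injEq] at h0 h1
    rw [pvSplit1]
    by_cases hc : c = '/'
    · rw [if_pos hc]
      simp [pvModHead, pvUnesc_nil, pvUnesc_tilde [] (by simp) (by simp)]
    · rw [if_neg hc]
      obtain ⟨s, ss, hs⟩ := List.exists_cons_of_ne_nil (pvSplit1_ne_nil t)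
      rw [hs]
      simp only [pvModHead, List.map_cons, List.singleton_append]
      rw [pvUnesc_tilde (c :: s) (by simpa using h0) (by simpa using h1)]

theorem altGo_eq : ∀ (l buf : List Char) (res : List (List Char)),
    pvAltGo l buf res = res ++ pvModHead buf ((pvSplit1 l).map pvUnesc)
  | [], buf, res => by
    simp [pvAltGo, pvSplit1, pvModHead, pvUnesc_nil]
  | c :: rest, buf, res => by
    rw [pvAltGo.eq_def]
    simp only []
    by_cases hc : c = '/'
    · subst hc
      rw [if_pos rfl, altGo_eq rest [] (res ++ [buf]), key_slash]
      obtain ⟨s, ss, hs⟩ := List.exists_cons_of_ne_nil (pvSplit1_ne_nil rest)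
      rw [hs]
      simp [pvModHead]
    · rw [if_neg hc]
      by_cases ht : c = '~'
      · subst ht
        rw [if_pos rfl]
        cases rest with
        | nil =>
          rw [altGo_eq [] (buf ++ ['~']) res, key_tilde [] (by simp) (by simp), pvModHead_modHead]
        | cons r1 r =>
          simp only []
          by_cases h1 : r1 = '1'
          · subst h1
            rw [if_pos rfl, altGo_eq r (buf ++ ['/']) res, key_t1, pvModHead_modHead]
          · rw [if_neg h1]
            by_cases h0 : r1 = '0'
            · subst h0
              rw [if_pos rfl, altGo_eq r (buf ++ ['~']) res, key_t0, pvModHead_modHead]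
            · rw [if_neg h0, altGo_eq (r1 :: r) (buf ++ ['~']) res,
                key_tilde (r1 :: r) (by simp [h0]) (by simp [h1]), pvModHead_modHead]
      · rw [if_neg ht, altGo_eq rest (buf ++ [c]) res, key_cons c rest hc ht, pvModHead_modHead]
termination_by l _ _ => l.length

theorem unesc_token_ofList (s : List Char) :
    unescape_json_pointer_token (String.ofList s) = String.ofList (pvUnesc s) := by
  rw [unescape_json_pointer_token, PySem.Str.replace, PySem.Str.replace]
  rw [String.toList_ofList, String.toList_ofList]
  rw [replace_eq _ _ _ (by decide), replace_eq _ _ _ (by decide)]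
  rfl

-- ===== VERDICT (by name: the statement is the Claim_ definition above) =====
theorem parse_json_pointer_spec : Claim_equal_parse_json_pointer := by
  intro pointer _ hpre
  unfold Spec_parse_json_pointer
  by_cases h0 : pointer = ""
  · simp [parse_json_pointer, parse_json_pointer_alt, h0]
  · have hsw : PySem.Str.startswith pointer "/" = true := hpre.resolve_left h0
    obtain ⟨rest, hrest⟩ : ∃ rest, pointer.toList = '/' :: rest := by
      have hpf : ("/".toList) <+: pointer.toList := by
        have := hsw
        rw [PySem.Str.startswith, PySem.Chars.startswith] at this
        exact List.isPrefixOf_iff_prefix.mp this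
      obtain ⟨t, ht⟩ := hpf
      exact ⟨t, ht.symm⟩
    have hslice : (PySem.Str.slice pointer (some 1) none).toList = rest := by
      rw [PySem.Str.slice, String.toList_ofList, PySem.Chars.slice_eq_listSlice,
        PySem.List.slice_from _ (by norm_num : (0:Int) ≤ 1), hrest]
      rfl
    have hsplit : PySem.Str.split? (PySem.Str.slice pointer (some 1) none) "/"
        = some (List.map String.ofList (pvSplit1 rest)) := by
      rw [PySem.Str.split?, PySem.Chars.split?, hslice]
      rw [if_neg (by decide)]
      rw [show "/".toList = ['/'] from rfl, splitOn_slash]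
      rfl
    obtain ⟨s, ss, hs⟩ := List.exists_cons_of_ne_nil (pvSplit1_ne_nil rest)
    have hA : parse_json_pointer pointer
        = List.map String.ofList (List.map pvUnesc (pvSplit1 rest)) := by
      rw [parse_json_pointer, if_neg h0, if_neg (by rw [hsw]; decide), hsplit]
      simp [unesc_token_ofList, List.map_map]
    have hB : parse_json_pointer_alt pointer
        = List.map String.ofList (List.map pvUnesc (pvSplit1 rest)) := by
      rw [parse_json_pointer_alt, if_neg h0, if_neg (by rw [hsw]; decide), hslice]
      rw [altGo_eq rest [] [], hs]
      simp [pvModHead]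
    rw [hA, hB]
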